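-- pv_equiv track=rewrite | github.com/anthony199586/whisky-auction | whisky_utils.py | detect_moon_import_series
-- ===== SOURCE A (Python) =====
-- def detect_moon_import_series(title, bottling_year):
--     """
--     Moon Import — Pepi Mongiardino, mid-1980s onwards.
--     Three iconic named series: Birds, Costumes, Sea.
--     Half Moon / Second Collection = earliest series.
--     All Moon Import is prestige.
--     """
--     title_lower = str(title).lower() if title else ""
--
--     if any(kw in title_lower for kw in
--            ["half moon", "second collection"]):
--         return "half moon", 5
--
--     if any(kw in title_lower for kw in
--            ["the birds", "birds series"]):
--         return "the birds", 5
--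
--     if any(kw in title_lower for kw in
--            ["the costumes", "costumes series"]):
--         return "the costumes", 5
--
--     if any(kw in title_lower for kw in
--            ["the sea", "sea series"]):
--         return "the sea", 5
--
--     if "representation" in title_lower:
--         return "representation series", 5
--
--     return "moon import standard", 4
-- ===== SOURCE B (Python) =====
-- # Flat keyword -> rule-index map; aggregate all matches and take the minimum
-- # (highest-priority) index instead of a chain of ordered branch tests.
-- _KEYWORD_RULE = {
--     "half moon": 0, "second collection": 0,
--     "the birds": 1, "birds series": 1,
--     "the costumes": 2, "costumes series": 2,
--     "the sea": 3, "sea series": 3,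
--     "representation": 4,
-- }
-- _RESULTS = [
--     ("half moon", 5),
--     ("the birds", 5),
--     ("the costumes", 5),
--     ("the sea", 5),
--     ("representation series", 5),
--     ("moon import standard", 4),
-- ]
--
-- def detect_moon_import_series(title, bottling_year):
--     title_lower = str(title).lower() if title else ""
--     best = min((idx for kw, idx in _KEYWORD_RULE.items() if kw in title_lower),
--                default=len(_RESULTS) - 1)
--     return _RESULTS[best]
-- ===== Notes on version B (the rewrite author's own statement) =====
-- stated objective: alternative
-- what changed: Replaces the ordered if/return branch chain by a flat keyword-to-priority map: B collects the priority indices of ALL matching keywords in one pass and returns the result at the minimum index, with the default as the sentinel maximum, instead of short-circuiting through five sequential branch tests.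
import Mathlib
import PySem

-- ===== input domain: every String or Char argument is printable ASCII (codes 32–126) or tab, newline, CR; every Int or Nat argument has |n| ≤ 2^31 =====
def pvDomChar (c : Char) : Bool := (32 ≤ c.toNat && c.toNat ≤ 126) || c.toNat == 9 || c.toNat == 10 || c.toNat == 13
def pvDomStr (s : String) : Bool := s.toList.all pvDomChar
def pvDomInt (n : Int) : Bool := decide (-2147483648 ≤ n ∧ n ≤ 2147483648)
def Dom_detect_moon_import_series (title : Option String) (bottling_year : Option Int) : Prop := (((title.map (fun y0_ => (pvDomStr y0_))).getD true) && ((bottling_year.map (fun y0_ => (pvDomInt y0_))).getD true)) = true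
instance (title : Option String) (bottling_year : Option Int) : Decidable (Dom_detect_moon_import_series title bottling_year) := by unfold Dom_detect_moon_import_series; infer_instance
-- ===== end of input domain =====

-- B replaces A's ordered branch chain by a flat keyword→priority map aggregated with min (alternative decomposition, same cost).
-- ===== PORT A =====
def detect_moon_import_series (title : Option String) (bottling_year : Option Int) : String × Int :=
  let title_lower : String :=
    match title with
    | none => ""
    | some s => if s = "" then "" else PySem.Str.lower s
  if ["half moon", "second collection"].any (fun kw => PySem.Str.isIn kw title_lower) then
    ("half moon", 5)
  else if ["the birds", "birds series"].any (fun kw => PySem.Str.isIn kw title_lower) then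
    ("the birds", 5)
  else if ["the costumes", "costumes series"].any (fun kw => PySem.Str.isIn kw title_lower) then
    ("the costumes", 5)
  else if ["the sea", "sea series"].any (fun kw => PySem.Str.isIn kw title_lower) then
    ("the sea", 5)
  else if PySem.Str.isIn "representation" title_lower then
    ("representation series", 5)
  else
    ("moon import standard", 4)

-- ===== PORT B =====
def moonKeywordRule : List (String × Nat) :=
  [ ("half moon", 0), ("second collection", 0),
    ("the birds", 1), ("birds series", 1),
    ("the costumes", 2), ("costumes series", 2),
    ("the sea", 3), ("sea series", 3),
    ("representation", 4) ]

def moonResults : List (String × Int) :=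
  [ ("half moon", 5),
    ("the birds", 5),
    ("the costumes", 5),
    ("the sea", 5),
    ("representation series", 5),
    ("moon import standard", 4) ]

def detect_moon_import_series_alt (title : Option String) (bottling_year : Option Int) : String × Int :=
  let title_lower : String :=
    match title with
    | none => ""
    | some s => if s = "" then "" else PySem.Str.lower s
  -- min(... , default=len(_RESULTS)-1) over the indices of matching keywords
  let hits : List Nat :=
    moonKeywordRule.filterMap (fun p => if PySem.Str.isIn p.1 title_lower then some p.2 else none)
  let best : Nat := (PySem.List.min? hits (fun x => x)).getD (moonResults.length - 1)
  (moonResults[best]?).getD ("moon import standard", 4)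

-- ===== PRECONDITION & SPEC =====
def Spec_detect_moon_import_series (title : Option String) (bottling_year : Option Int) (out : String × Int) : Prop := out = detect_moon_import_series_alt title bottling_year
instance (title : Option String) (bottling_year : Option Int) (out : String × Int) : Decidable (Spec_detect_moon_import_series title bottling_year out) := by unfold Spec_detect_moon_import_series; infer_instance

-- ===== CLAIM (what is proved, stated in full; the proofs are below) =====
def Claim_equal_detect_moon_import_series : Prop := ∀ (title : Option String) (bottling_year : Option Int), Dom_detect_moon_import_series title bottling_year → Spec_detect_moon_import_series title bottling_year (detect_moon_import_series title bottling_year)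

-- ===== LEMMAS AND PROOFS =====

-- ===== VERDICT (by name: the statement is the Claim_ definition above) =====
theorem detect_moon_import_series_spec : Claim_equal_detect_moon_import_series := by
  intro title bottling_year _
  unfold Spec_detect_moon_import_series detect_moon_import_series detect_moon_import_series_alt
  cases title with
  | none => decide
  | some s =>
    by_cases hs : s = ""
    · subst hs; decide
    · simp only [moonKeywordRule, moonResults, List.any_cons, List.any_nil, Bool.or_false, List.filterMap_cons, List.filterMap_nil, if_neg hs]
      generalize PySem.Str.isIn "half moon" (PySem.Str.lower s) = b1
      generalize PySem.Str.isIn "second collection" (PySem.Str.lower s) = b2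
      generalize PySem.Str.isIn "the birds" (PySem.Str.lower s) = b3
      generalize PySem.Str.isIn "birds series" (PySem.Str.lower s) = b4
      generalize PySem.Str.isIn "the costumes" (PySem.Str.lower s) = b5
      generalize PySem.Str.isIn "costumes series" (PySem.Str.lower s) = b6
      generalize PySem.Str.isIn "the sea" (PySem.Str.lower s) = b7
      generalize PySem.Str.isIn "sea series" (PySem.Str.lower s) = b8
      generalize PySem.Str.isIn "representation" (PySem.Str.lower s) = b9
      cases b1 <;> cases b2 <;> cases b3 <;> cases b4 <;> cases b5 <;> cases b6 <;> cases b7 <;> cases b8 <;> cases b9 <;> decide
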